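-- pv_equiv track=rewrite | github.com/MarandW/CV_lines_detector | CV_analitic.py | glue_lines
-- ===== SOURCE A (Python) =====
-- def glue_lines(tresh, ignore):
--     j = 0
--     stan0 = 0
--     stan1 = 0
--     for i in range(ignore, len(tresh) - ignore):
--         stan = tresh[i]
--         if stan0 == 0:
--             stan0 = stan
--             stan1 = stan
--         else:
--             if stan != stan1:
--                 if stan == 0:
--                     j += 1
--                 else:
--                     if stan == stan0:
--                         for k in range(i - j, i):
--                             tresh[k] = stan0
--                     stan0 = stan
--                     j = 0
--             else:
--                 if stan == 0:
--                     j += 1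
--             stan1 = stan
--
--     return tresh
-- ===== SOURCE B (Python) =====
-- def glue_lines(tresh, ignore):
--     # Two-pass version: build an index table of the nonzero entries in the
--     # window, then fill the zero gap between each pair of adjacent equal
--     # nonzeros.  Mutates tresh in place (like the original) and returns it.
--     nz = [(i, tresh[i]) for i in range(ignore, len(tresh) - ignore) if tresh[i] != 0]
--     for (p, pv), (c, cv) in zip(nz, nz[1:]):
--         if pv == cv:
--             for k in range(p + 1, c):
--                 tresh[k] = pv
--     return tresh
-- ===== Notes on version B (the rewrite author's own statement) =====
-- stated objective: simpler
-- what changed: Replaces A's interleaved one-pass j/stan0/stan1 state machine with two passes: first build an index table of the nonzero entries in the window, then fill the zero gap between each adjacent pair of equal nonzeros.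
import Mathlib
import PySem

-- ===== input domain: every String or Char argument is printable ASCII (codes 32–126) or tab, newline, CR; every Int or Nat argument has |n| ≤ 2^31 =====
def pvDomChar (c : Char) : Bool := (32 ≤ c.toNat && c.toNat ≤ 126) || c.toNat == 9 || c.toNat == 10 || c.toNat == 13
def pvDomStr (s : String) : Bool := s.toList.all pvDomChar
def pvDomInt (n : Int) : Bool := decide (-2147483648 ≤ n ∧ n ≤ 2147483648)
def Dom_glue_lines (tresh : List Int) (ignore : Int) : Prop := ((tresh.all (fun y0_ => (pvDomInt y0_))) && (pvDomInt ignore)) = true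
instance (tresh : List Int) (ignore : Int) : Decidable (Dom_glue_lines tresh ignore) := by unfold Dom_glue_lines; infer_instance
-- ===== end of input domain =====

-- B replaces A's one-pass j/stan0/stan1 state machine with two passes (nonzero index
-- table, then gap filling); both mutate the Python list in place, the equivalence
-- proved here is about the returned value.

-- ===== PORT A =====
-- 'for k in range(lo, hi): tresh[k] = v'  (shared inner fill loop of both Pythons)
def pvFill (t : List Int) (lo hi v : Int) : List Int :=
  (PySem.List.pyRange lo hi 1).foldl (fun u k => PySem.List.pySetD u k v) t

-- the body of A's main loop; state is (tresh, j, stan0, stan1)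
def glueStep (st : List Int × Int × Int × Int) (i : Int) : List Int × Int × Int × Int :=
  let t := st.1
  let j := st.2.1
  let stan0 := st.2.2.1
  let stan1 := st.2.2.2
  let stan := PySem.List.pyGetD t i 0   -- tresh[i]; in range whenever 0 ≤ ignore (Pre_)
  if stan0 = 0 then (t, j, stan, stan)
  else if stan ≠ stan1 then
    if stan = 0 then (t, j + 1, stan0, stan)
    else if stan = stan0 then (pvFill t (i - j) i stan0, 0, stan, stan)
    else (t, 0, stan, stan)
  else if stan = 0 then (t, j + 1, stan0, stan)
  else (t, j, stan0, stan)

def glue_lines (tresh : List Int) (ignore : Int) : List Int :=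
  ((PySem.List.pyRange ignore ((tresh.length : Int) - ignore) 1).foldl glueStep
    (tresh, 0, 0, 0)).1

-- ===== PORT B =====
def glue_lines_alt (tresh : List Int) (ignore : Int) : List Int :=
  let nz := (PySem.List.pyRange ignore ((tresh.length : Int) - ignore) 1).filterMap
    (fun i => if PySem.List.pyGetD tresh i 0 ≠ 0
              then some (i, PySem.List.pyGetD tresh i 0) else none)
  (nz.zip nz.tail).foldl
    (fun t pq => if pq.1.2 = pq.2.2 then pvFill t (pq.1.1 + 1) pq.2.1 pq.1.2 else t) tresh

-- ===== PRECONDITION & SPEC =====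
-- Pre_ excludes exactly ignore < 0: there Python A always raises IndexError
-- (the loop's index range leaves the list), and B raises there too.
def Pre_glue_lines (tresh : List Int) (ignore : Int) : Prop := 0 ≤ ignore
instance (tresh : List Int) (ignore : Int) : Decidable (Pre_glue_lines tresh ignore) := by
  unfold Pre_glue_lines; infer_instance

def pvWitness_glue_lines : List Int × Int := ([0, 3, 0, 0, 3, 1, 0, 2], 1)

def Spec_glue_lines (tresh : List Int) (ignore : Int) (out : List Int) : Prop :=
  out = glue_lines_alt tresh ignore
instance (tresh : List Int) (ignore : Int) (out : List Int) :
    Decidable (Spec_glue_lines tresh ignore out) := by unfold Spec_glue_lines; infer_instance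

-- ===== CLAIM (what is proved, stated in full; the proofs are below) =====
def Claim_equal_glue_lines : Prop := ∀ (tresh : List Int) (ignore : Int),
  Dom_glue_lines tresh ignore → Pre_glue_lines tresh ignore →
  Spec_glue_lines tresh ignore (glue_lines tresh ignore)

-- ===== LEMMAS AND PROOFS =====

-- B's second pass as a function of the nonzero table (definitional repackaging of B)
def pairsFold (t : List Int) (nz : List (Int × Int)) : List Int :=
  (nz.zip nz.tail).foldl
    (fun u pq => if pq.1.2 = pq.2.2 then pvFill u (pq.1.1 + 1) pq.2.1 pq.1.2 else u) t

-- B's first pass: the nonzero entries of t0 with indices in [i, b)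
def nzFrom (t0 : List Int) (i b : Int) : List (Int × Int) :=
  (PySem.List.pyRange i b 1).filterMap
    (fun k => if PySem.List.pyGetD t0 k 0 ≠ 0
              then some (k, PySem.List.pyGetD t0 k 0) else none)

-- invariant tying A's loop state at position i to the table of nonzeros seen so far
def InvState (t0 : List Int) (i j s0 s1 : Int) (nzP : List (Int × Int)) : Prop :=
  match nzP.getLast? with
  | none => j = 0 ∧ s0 = 0
  | some (p, v) => 0 ≤ p ∧ p < i ∧ s0 = v ∧ v ≠ 0 ∧ j = i - 1 - p ∧
      PySem.List.pyGetD t0 p 0 = v ∧ s1 = PySem.List.pyGetD t0 (i - 1) 0 ∧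
      (∀ k : Int, p < k → k < i → PySem.List.pyGetD t0 k 0 = 0)


lemma length_foldl_pySetD (idxs : List Int) (t : List Int) (v : Int) :
    (idxs.foldl (fun u k => PySem.List.pySetD u k v) t).length = t.length := by
  induction idxs generalizing t with
  | nil => rfl
  | cons a l ih => simp [ih, PySem.List.length_pySetD]

lemma getD_pySetD_high (t : List Int) (a v k : Int) (ha : 0 ≤ a) (hk : a < k) :
    PySem.List.pyGetD (PySem.List.pySetD t a v) k 0 = PySem.List.pyGetD t k 0 := by
  rw [PySem.List.pySetD_of_nonneg t v ha]
  unfold PySem.List.pyGetD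
  rw [PySem.List.pyGet?_of_nonneg _ (by omega : (0:Int) ≤ k),
    PySem.List.pyGet?_of_nonneg _ (by omega : (0:Int) ≤ k),
    List.getElem?_set_ne (by omega)]

lemma getD_foldl_pySetD_high (idxs : List Int) (t : List Int) (v k : Int)
    (h : ∀ x ∈ idxs, 0 ≤ x ∧ x < k) :
    PySem.List.pyGetD (idxs.foldl (fun u i => PySem.List.pySetD u i v) t) k 0
      = PySem.List.pyGetD t k 0 := by
  induction idxs generalizing t with
  | nil => rfl
  | cons a l ih =>
    have ha := h a (by simp)
    rw [List.foldl_cons, ih _ (fun x hx => h x (by simp [hx])),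
      getD_pySetD_high t a v k ha.1 ha.2]

lemma length_pvFill (t : List Int) (lo hi v : Int) :
    (pvFill t lo hi v).length = t.length := length_foldl_pySetD _ t v

lemma getD_pvFill_high (t : List Int) (lo hi v k : Int) (hlo : 0 ≤ lo) (hk : hi ≤ k) :
    PySem.List.pyGetD (pvFill t lo hi v) k 0 = PySem.List.pyGetD t k 0 := by
  apply getD_foldl_pySetD_high
  intro x hx
  rw [PySem.List.mem_pyRange_one] at hx
  omega

lemma pvFill_empty (t : List Int) (lo hi v : Int) (h : hi ≤ lo) :
    pvFill t lo hi v = t := by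
  unfold pvFill
  rw [PySem.List.pyRange_one_eq_nil h]
  rfl

lemma zipTail_snoc (l : List (Int × Int)) (x y : Int × Int) (h : l.getLast? = some y) :
    (l ++ [x]).zip (l ++ [x]).tail = l.zip l.tail ++ [(y, x)] := by
  induction l generalizing y with
  | nil => simp at h
  | cons a l ih =>
    cases l with
    | nil => simp at h; simp [h]
    | cons b l' =>
      rw [List.getLast?_cons_cons] at h
      simp only [List.cons_append, List.tail_cons, List.zip_cons_cons]
      have hih := ih _ h
      simp only [List.cons_append, List.tail_cons] at hih
      rw [hih]

lemma pairsFold_snoc_last (t0 : List Int) (l : List (Int × Int)) (x y : Int × Int)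
    (h : l.getLast? = some y) :
    pairsFold t0 (l ++ [x]) =
      if y.2 = x.2 then pvFill (pairsFold t0 l) (y.1 + 1) x.1 y.2 else pairsFold t0 l := by
  unfold pairsFold
  rw [zipTail_snoc l x y h, List.foldl_append]
  rfl

lemma nzFrom_nil (t0 : List Int) (i b : Int) (h : b ≤ i) : nzFrom t0 i b = [] := by
  unfold nzFrom
  rw [PySem.List.pyRange_one_eq_nil h]
  rfl

lemma nzFrom_cons (t0 : List Int) (i b : Int) (h : i < b) :
    nzFrom t0 i b =
      (if PySem.List.pyGetD t0 i 0 ≠ 0 then [(i, PySem.List.pyGetD t0 i 0)] else [])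
        ++ nzFrom t0 (i + 1) b := by
  unfold nzFrom
  rw [PySem.List.pyRange_one_cons h, List.filterMap_cons]
  split <;> simp_all

lemma loopA_eq (t0 : List Int) (b : Int) :
    ∀ (m : Nat) (i : Int), (b - i).toNat ≤ m → 0 ≤ i →
    ∀ (t : List Int) (j s0 s1 : Int) (nzP : List (Int × Int)),
      t.length = t0.length →
      (∀ k : Int, i ≤ k → PySem.List.pyGetD t k 0 = PySem.List.pyGetD t0 k 0) →
      t = pairsFold t0 nzP →
      InvState t0 i j s0 s1 nzP →
      ((PySem.List.pyRange i b 1).foldl glueStep (t, j, s0, s1)).1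
        = pairsFold t0 (nzP ++ nzFrom t0 i b) := by
  intro m
  induction m with
  | zero =>
    intro i him hi t j s0 s1 nzP hlen hagree ht hinv
    rw [PySem.List.pyRange_one_eq_nil (by omega), nzFrom_nil t0 i b (by omega)]
    simpa using ht
  | succ m ih =>
    intro i him hi t j s0 s1 nzP hlen hagree ht hinv
    by_cases hib : i < b
    · rw [PySem.List.pyRange_one_cons hib, List.foldl_cons, nzFrom_cons t0 i b hib]
      have hstan : PySem.List.pyGetD t i 0 = PySem.List.pyGetD t0 i 0 := hagree i le_rfl
      cases hL : nzP.getLast? with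
      | none =>
        have hnil : nzP = [] := List.getLast?_eq_none_iff.mp hL
        subst hnil
        unfold InvState at hinv
        simp only [hL] at hinv  -- may need adjusting
        obtain ⟨hj, hs0⟩ := hinv
        subst hj; subst hs0
        have ht0 : t = t0 := ht
        by_cases hz : PySem.List.pyGetD t0 i 0 = 0
        · have hstep : glueStep (t, 0, 0, s1) i = (t, 0, 0, 0) := by
            simp [glueStep, hstan, hz]
          rw [hstep, if_neg (by simpa using hz), List.nil_append, List.nil_append]
          exact ih (i + 1) (by omega) (by omega) t 0 0 0 [] hlen
            (fun k hk => hagree k (by omega)) ht (by unfold InvState; exact ⟨rfl, rfl⟩)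
        · have hstep : glueStep (t, 0, 0, s1) i
              = (t, 0, PySem.List.pyGetD t0 i 0, PySem.List.pyGetD t0 i 0) := by
            simp [glueStep, hstan]
          rw [hstep, if_pos (by simpa using hz), List.nil_append, List.singleton_append]
          have := ih (i + 1) (by omega) (by omega) t 0 (PySem.List.pyGetD t0 i 0)
            (PySem.List.pyGetD t0 i 0) [(i, PySem.List.pyGetD t0 i 0)] hlen
            (fun k hk => hagree k (by omega)) ht
            (by
              unfold InvState
              simp only [List.getLast?_singleton]
              refine ⟨by omega, by omega, by trivial, hz, by omega, by trivial, ?_, ?_⟩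
              · rw [show i + 1 - 1 = i by ring]
              · intro k hk1 hk2; omega)
          simpa using this
      | some pv =>
        obtain ⟨p, v⟩ := pv
        unfold InvState at hinv
        simp only [hL] at hinv
        obtain ⟨hp0, hpi, hs0, hv0, hj, htp, hs1, hzeros⟩ := hinv
        have hs0ne : s0 ≠ 0 := by rw [hs0]; exact hv0
        by_cases hz : PySem.List.pyGetD t0 i 0 = 0
        · -- zero entry: both branches of A just count it; table unchanged
          have hstep : glueStep (t, j, s0, s1) i = (t, j + 1, s0, 0) := by
            simp [glueStep, hstan, hz, hs0ne]
          rw [hstep, if_neg (by simpa using hz), List.nil_append]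
          apply ih (i + 1) (by omega) (by omega) t (j + 1) s0 0 nzP hlen
            (fun k hk => hagree k (by omega)) ht
          unfold InvState
          simp only [hL]
          refine ⟨hp0, by omega, hs0, hv0, by omega, htp, ?_, ?_⟩
          · rw [show i + 1 - 1 = i by ring, hz]
          · intro k hk1 hk2
            by_cases hki : k < i
            · exact hzeros k hk1 hki
            · rw [show k = i by omega]; exact hz
        · rw [if_pos (by simpa using hz), ← List.append_assoc]
          by_cases hss : PySem.List.pyGetD t0 i 0 = s1
          · -- equal to the (nonzero) previous element: p = i - 1, empty gap
            have hpi1 : p = i - 1 := by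
              by_contra hne
              have h0 := hzeros (i - 1) (by omega) (by omega)
              rw [← hs1] at h0
              exact hz (by rw [hss, h0])
            have hveq : v = PySem.List.pyGetD t0 i 0 := by
              rw [← htp, hpi1, hss, hs1]
            have hs1ne : ¬ s1 = 0 := by rw [← hss]; exact hz
            have hstep : glueStep (t, j, s0, s1) i
                = (t, j, s0, PySem.List.pyGetD t0 i 0) := by
              simp [glueStep, hstan, hs0ne, hss, hs1ne]
            rw [hstep]
            have hpf : pairsFold t0 (nzP ++ [(i, PySem.List.pyGetD t0 i 0)]) = t := by
              rw [pairsFold_snoc_last t0 nzP _ (p, v) hL]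
              simp only
              rw [if_pos hveq, ← ht, hpi1]
              exact pvFill_empty _ _ _ _ (by omega)
            apply ih (i + 1) (by omega) (by omega) t j s0 (PySem.List.pyGetD t0 i 0)
              (nzP ++ [(i, PySem.List.pyGetD t0 i 0)]) hlen
              (fun k hk => hagree k (by omega)) hpf.symm
            unfold InvState
            rw [List.getLast?_concat]
            refine ⟨by omega, by omega, by rw [hs0, hveq], hz, by omega, rfl, ?_, ?_⟩
            · rw [show i + 1 - 1 = i by ring]
            · intro k hk1 hk2; omega
          · -- a new nonzero after a gap: fill iff it matches the previous nonzero value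
            by_cases hgs0 : PySem.List.pyGetD t0 i 0 = s0
            · have hstep : glueStep (t, j, s0, s1) i
                  = (pvFill t (i - j) i s0, 0, PySem.List.pyGetD t0 i 0,
                      PySem.List.pyGetD t0 i 0) := by
                have hss' : ¬ s0 = s1 := by rw [← hgs0]; exact hss
                simp [glueStep, hstan, hs0ne, hgs0, hss']
              rw [hstep]
              have hveq : v = PySem.List.pyGetD t0 i 0 := by rw [hgs0, hs0]
              have hfill : pvFill t (i - j) i s0 = pvFill t (p + 1) i v := by
                rw [hs0, show i - j = p + 1 by omega]
              have hpf : pairsFold t0 (nzP ++ [(i, PySem.List.pyGetD t0 i 0)])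
                  = pvFill t (p + 1) i v := by
                rw [pairsFold_snoc_last t0 nzP _ (p, v) hL]
                simp only
                rw [if_pos hveq, ← ht]
              rw [hfill]
              apply ih (i + 1) (by omega) (by omega) _ 0 (PySem.List.pyGetD t0 i 0)
                (PySem.List.pyGetD t0 i 0) (nzP ++ [(i, PySem.List.pyGetD t0 i 0)])
                (by rw [length_pvFill]; exact hlen)
                (fun k hk => by
                  rw [getD_pvFill_high t (p + 1) i v k (by omega) (by omega)]
                  exact hagree k (by omega))
                hpf.symm
              unfold InvState
              rw [List.getLast?_concat]
              refine ⟨by omega, by omega, rfl, hz, by omega, rfl, ?_, ?_⟩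
              · rw [show i + 1 - 1 = i by ring]
              · intro k hk1 hk2; omega
            · have hstep : glueStep (t, j, s0, s1) i
                  = (t, 0, PySem.List.pyGetD t0 i 0, PySem.List.pyGetD t0 i 0) := by
                simp [glueStep, hstan, hs0ne, hss, hz, hgs0]
              rw [hstep]
              have hvne : ¬ v = PySem.List.pyGetD t0 i 0 := by
                rw [← hs0]; exact fun h => hgs0 h.symm
              have hpf : pairsFold t0 (nzP ++ [(i, PySem.List.pyGetD t0 i 0)]) = t := by
                rw [pairsFold_snoc_last t0 nzP _ (p, v) hL]
                simp only
                rw [if_neg hvne, ← ht]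
              apply ih (i + 1) (by omega) (by omega) t 0 (PySem.List.pyGetD t0 i 0)
                (PySem.List.pyGetD t0 i 0) (nzP ++ [(i, PySem.List.pyGetD t0 i 0)]) hlen
                (fun k hk => hagree k (by omega)) hpf.symm
              unfold InvState
              rw [List.getLast?_concat]
              refine ⟨by omega, by omega, rfl, hz, by omega, rfl, ?_, ?_⟩
              · rw [show i + 1 - 1 = i by ring]
              · intro k hk1 hk2; omega
    · rw [PySem.List.pyRange_one_eq_nil (by omega), nzFrom_nil t0 i b (by omega)]
      simpa using ht

theorem glue_lines_spec : Claim_equal_glue_lines := by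
  intro tresh ignore _hDom hPre
  unfold Spec_glue_lines
  have halt : glue_lines_alt tresh ignore
      = pairsFold tresh (nzFrom tresh ignore ((tresh.length : Int) - ignore)) := rfl
  have hPre' : (0 : Int) ≤ ignore := hPre
  have h := loopA_eq tresh ((tresh.length : Int) - ignore)
    (((tresh.length : Int) - ignore - ignore).toNat) ignore le_rfl hPre'
    tresh 0 0 0 [] rfl (fun _ _ => rfl) rfl (by constructor <;> rfl)
  unfold glue_lines
  rw [halt, h]
  rfl
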